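-- pv_equiv track=rewrite | github.com/SaujanShr/music_transformer | data_extraction/token.py | _note_to_index
-- ===== SOURCE A (Python) =====
-- def _note_to_index(note: str) -> int:
--     match note[1]:
--         case '#':
--             return _note_to_index(note[0] + note[2:]) + 1
--         case '-':
--             return _note_to_index(note[0] + note[2:]) - 1
--         case n if n.isdecimal():
--             key = ord(note[0]) - 65
--             octave = int(note[1:]) * 12
--             return key + octave
--         case _:
--             return -1
-- ===== SOURCE B (Python) =====
-- def _note_to_index(note: str) -> int:
--     head, tail = note[0], note[1:]
--     rest = tail.lstrip('#-')
--     acc = tail[:len(tail) - len(rest)]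
--     offset = acc.count('#') - acc.count('-')
--     if rest[:1].isdecimal():
--         return ord(head) - 65 + int(rest) * 12 + offset
--     return -1
-- ===== Notes on version B (the rewrite author's own statement) =====
-- stated objective: simpler
-- what changed: Replaces A's recursion, which rebuilds the string note[0]+note[2:] for every accidental, with staged string-method passes: lstrip the accidental run, compute the offset with count, then parse the remainder once; returns a clean -1 for unparsable notes.
-- intended difference: On notes of the form letter, then a run of '#'/'-' with unequal counts, then a non-digit (e.g. 'A#x'), A returns -1 plus the accidental offset because the recursion adds its +/-1 to the -1 error sentinel, while B returns the plain error sentinel -1, the intended value for an unparsable note. — e.g. on _note_to_index("A#x"): A returns 0, B returns -1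
import Mathlib
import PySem

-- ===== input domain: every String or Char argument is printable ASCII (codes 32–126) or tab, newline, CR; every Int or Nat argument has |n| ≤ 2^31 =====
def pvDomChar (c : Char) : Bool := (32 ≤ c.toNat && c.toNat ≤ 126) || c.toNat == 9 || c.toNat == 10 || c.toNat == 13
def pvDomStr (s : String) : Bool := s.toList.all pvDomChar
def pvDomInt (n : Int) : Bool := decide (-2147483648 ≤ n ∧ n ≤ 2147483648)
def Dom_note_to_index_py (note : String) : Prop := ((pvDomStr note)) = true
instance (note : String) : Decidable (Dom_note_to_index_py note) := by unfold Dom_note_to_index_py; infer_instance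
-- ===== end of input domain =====

-- B replaces A's recursion (which rebuilds note[0]+note[2:] at every accidental) by staged
-- string-method passes (strip the accidental run, count '#'/'-', parse the remainder once);
-- on "letter, accidentals, junk" A leaks the offset into its -1 sentinel while B returns
-- plain -1 (stated as D_ below).

-- ===== PORT A =====
-- A's recursion on note.toList. Every recursive call is on note[0] + note[2:], so note[0] stays
-- fixed: it is the parameter c0 and the list argument is note[1:] (value-for-value the same
-- strings A builds, represented c0 :: tail so the recursion is structural). note[1] missing
-- (tail = [], i.e. len < 2) = IndexError: outside Pre_, sentinel 0. int(note[1:]) =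
-- PySem.Int.ofChars? (c1 :: rest), getD 0 only reached outside Pre_ (ValueError);
-- isdecimal = PySem.Chars.isdigit (exact on the ASCII domain).
def noteToIndexARec (c0 : Char) : List Char → Int
  | c1 :: rest =>
    if c1 = '#' then noteToIndexARec c0 rest + 1
    else if c1 = '-' then noteToIndexARec c0 rest - 1
    else if PySem.Chars.isdigit c1 then
      ((c0.toNat : Int) - 65) + ((PySem.Int.ofChars? (c1 :: rest)).getD 0) * 12
    else -1
  | [] => 0

def note_to_index_py (note : String) : Int :=
  match note.toList with
  | [] => 0
  | c0 :: tail => noteToIndexARec c0 tail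

-- ===== PORT B =====
-- B's staged passes: head/tail split (note[0] on "" = IndexError, outside Pre_, sentinel -1);
-- tail.lstrip('#-') = dropWhile, the stripped prefix acc = takeWhile; str.count on the accidental
-- run = List.count; rest[:1].isdecimal() = isdigit test on the head of rest (False for empty rest);
-- int(rest) = PySem.Int.ofChars?, getD 0 only reached outside Pre_ (ValueError).
def note_to_index_py_alt (note : String) : Int :=
  match note.toList with
  | [] => -1
  | c0 :: tail =>
    let rest := tail.dropWhile (fun c => c == '#' || c == '-')
    let acc := tail.takeWhile (fun c => c == '#' || c == '-')
    let offset : Int := (acc.count '#' : Int) - (acc.count '-' : Int)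
    match rest with
    | [] => -1
    | c :: r =>
      if PySem.Chars.isdigit c then
        ((c0.toNat : Int) - 65) + ((PySem.Int.ofChars? (c :: r)).getD 0) * 12 + offset
      else -1

-- ===== PRECONDITION & SPEC =====
-- Pre_ excludes exactly the inputs where the Python A raises: strings whose tail after position 0
-- is nothing but accidentals '#'/'-' (IndexError, including len < 2), and those where the first
-- char after the accidentals is a digit but the remaining tail is not a valid int literal (ValueError).
def Pre_note_to_index_py (note : String) : Prop :=
  ((note.toList.drop 1).dropWhile (fun c => c == '#' || c == '-') ≠ []) ∧
  (PySem.Chars.isdigit (((note.toList.drop 1).dropWhile (fun c => c == '#' || c == '-')).headD 'x') = true →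
    (PySem.Int.ofChars? ((note.toList.drop 1).dropWhile (fun c => c == '#' || c == '-'))).isSome = true)
instance (note : String) : Decidable (Pre_note_to_index_py note) := by unfold Pre_note_to_index_py; infer_instance

def pvWitness_note_to_index_py : String := "A4"

-- On notes "letter, then a run of '#'/'-' with unequal counts, then a non-digit" A returns
-- -1 + (#count − -count) because the accidental recursion adds its ±1 to the -1 error sentinel;
-- B returns the plain error sentinel -1, the intended value for an unparsable note.
def D_note_to_index_py (note : String) : Prop :=
  let s := (note.toList.drop 1).span (fun c => c == '#' || c == '-')
  PySem.Chars.isdigit (s.2.headD 'x') = false ∧ s.1.count '#' ≠ s.1.count '-' 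
instance (note : String) : Decidable (D_note_to_index_py note) := by unfold D_note_to_index_py; infer_instance

def Spec_note_to_index_py (note : String) (out : Int) : Prop :=
  ¬ D_note_to_index_py note → out = note_to_index_py_alt note
instance (note : String) (out : Int) : Decidable (Spec_note_to_index_py note out) := by unfold Spec_note_to_index_py; infer_instance

def pvDiffWitness_note_to_index_py : String := "A#x"
def pvDiffWitnessOut_note_to_index_py : Int × Int := (0, -1)

-- ===== CLAIM (what is proved, stated in full; the proofs are below) =====
def Claim_unchanged_note_to_index_py : Prop := ∀ (note : String), Dom_note_to_index_py note → Pre_note_to_index_py note → Spec_note_to_index_py note (note_to_index_py note)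
def Claim_changed_note_to_index_py : Prop := Dom_note_to_index_py (pvDiffWitness_note_to_index_py) ∧ Pre_note_to_index_py (pvDiffWitness_note_to_index_py) ∧ D_note_to_index_py (pvDiffWitness_note_to_index_py) ∧ note_to_index_py (pvDiffWitness_note_to_index_py) = pvDiffWitnessOut_note_to_index_py.1 ∧ note_to_index_py_alt (pvDiffWitness_note_to_index_py) = pvDiffWitnessOut_note_to_index_py.2 ∧ pvDiffWitnessOut_note_to_index_py.1 ≠ pvDiffWitnessOut_note_to_index_py.2
def Claim_exact_note_to_index_py : Prop := ∀ (note : String), Dom_note_to_index_py note → Pre_note_to_index_py note → D_note_to_index_py note → note_to_index_py note ≠ note_to_index_py_alt note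

-- ===== LEMMAS AND PROOFS =====

-- accidental offset accumulated by A over the leading '#'/'-' run of the tail
def tailOffset (tail : List Char) : Int :=
  ((tail.takeWhile (fun c => c == '#' || c == '-')).count '#' : Int) -
  ((tail.takeWhile (fun c => c == '#' || c == '-')).count '-' : Int)

-- value of the non-accidental suffix (A's base cases, without offset)
def tailValue (c0 : Char) (tail : List Char) : Int :=
  match tail.dropWhile (fun c => c == '#' || c == '-') with
  | [] => 0
  | c :: r => if PySem.Chars.isdigit c then
      ((c0.toNat : Int) - 65) + ((PySem.Int.ofChars? (c :: r)).getD 0) * 12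
    else -1

lemma dropWhile_cons_acc (c : Char) (rest : List Char) (h : (c == '#' || c == '-') = true) :
    List.dropWhile (fun c => c == '#' || c == '-') (c :: rest) =
    List.dropWhile (fun c => c == '#' || c == '-') rest := by
  simp [List.dropWhile, h]

lemma takeWhile_cons_acc (c : Char) (rest : List Char) (h : (c == '#' || c == '-') = true) :
    List.takeWhile (fun c => c == '#' || c == '-') (c :: rest) =
    c :: List.takeWhile (fun c => c == '#' || c == '-') rest := by
  simp [List.takeWhile, h]

lemma tailValue_cons_acc (c0 c : Char) (rest : List Char) (h : (c == '#' || c == '-') = true) :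
    tailValue c0 (c :: rest) = tailValue c0 rest := by
  unfold tailValue
  rw [dropWhile_cons_acc c rest h]

lemma tailOffset_cons_hash (rest : List Char) :
    tailOffset ('#' :: rest) = tailOffset rest + 1 := by
  unfold tailOffset
  rw [takeWhile_cons_acc '#' rest (by decide)]
  simp
  ring

lemma tailOffset_cons_dash (rest : List Char) :
    tailOffset ('-' :: rest) = tailOffset rest - 1 := by
  unfold tailOffset
  rw [takeWhile_cons_acc '-' rest (by decide)]
  simp
  ring

-- characterisation of A's recursion: base value plus accidental offset
lemma A_char (tail : List Char) (c0 : Char) :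
    noteToIndexARec c0 tail = tailValue c0 tail + tailOffset tail := by
  induction tail with
  | nil => simp [noteToIndexARec, tailValue, tailOffset]
  | cons c rest ih =>
    by_cases h1 : c = '#'
    · subst h1
      have hA : noteToIndexARec c0 ('#' :: rest) = noteToIndexARec c0 rest + 1 := by
        simp [noteToIndexARec]
      rw [hA, ih, tailValue_cons_acc c0 '#' rest (by decide), tailOffset_cons_hash]
      ring
    · by_cases h2 : c = '-'
      · subst h2
        have hA : noteToIndexARec c0 ('-' :: rest) = noteToIndexARec c0 rest - 1 := by
          simp [noteToIndexARec]
        rw [hA, ih, tailValue_cons_acc c0 '-' rest (by decide), tailOffset_cons_dash]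
        ring
      · have hp : (c == '#' || c == '-') = false := by simp [h1, h2]
        have hdw : List.dropWhile (fun c => c == '#' || c == '-') (c :: rest) = c :: rest := by
          simp [List.dropWhile, hp]
        have htw : List.takeWhile (fun c => c == '#' || c == '-') (c :: rest) = [] := by
          simp [List.takeWhile, hp]
        unfold tailValue tailOffset
        rw [hdw, htw]
        simp [noteToIndexARec, h1, h2]

-- B's staged computation written through tailValue/tailOffset
lemma B_char (note : String) (c0 : Char) (tail : List Char) (hl : note.toList = c0 :: tail) :
    note_to_index_py_alt note =
      match tail.dropWhile (fun c => c == '#' || c == '-') with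
      | [] => -1
      | c :: r => if PySem.Chars.isdigit c then
          ((c0.toNat : Int) - 65) + ((PySem.Int.ofChars? (c :: r)).getD 0) * 12 + tailOffset tail
        else -1 := by
  unfold note_to_index_py_alt tailOffset
  rw [hl]

lemma main_eq (note : String) (hpre : Pre_note_to_index_py note)
    (hnd : ¬ D_note_to_index_py note) :
    note_to_index_py note = note_to_index_py_alt note := by
  obtain ⟨h1, _⟩ := hpre
  cases hl : note.toList with
  | nil => exact absurd (by rw [hl]; rfl) h1
  | cons c0 tail =>
    have htail : note.toList.drop 1 = tail := by simp [hl]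
    have hA : note_to_index_py note = noteToIndexARec c0 tail := by
      unfold note_to_index_py; rw [hl]
    rw [hA, A_char, B_char note c0 tail hl]
    rw [htail] at h1
    unfold tailValue
    cases hrest : tail.dropWhile (fun c => c == '#' || c == '-') with
    | nil => exact absurd hrest h1
    | cons c r =>
      simp only []
      split_ifs with hd
      · ring
      · have hd' : PySem.Chars.isdigit c = false := by simpa using hd
        have hoff : tailOffset tail = 0 := by
          by_cases hcnt : (tail.takeWhile (fun c => c == '#' || c == '-')).count '#' =
              (tail.takeWhile (fun c => c == '#' || c == '-')).count '-'
          · simp [tailOffset, hcnt]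
          · refine absurd ⟨?_, ?_⟩ hnd
            · simp only [List.span_eq_takeWhile_dropWhile, htail, hrest]
              simpa using hd'
            · simp only [List.span_eq_takeWhile_dropWhile, htail]
              exact hcnt
        rw [hoff]
        ring

-- ===== VERDICT (by name: the statement is the Claim_ definition above) =====
theorem note_to_index_py_spec : Claim_unchanged_note_to_index_py := by
  intro note _ hpre hnd
  exact main_eq note hpre hnd

theorem note_to_index_py_changed : Claim_changed_note_to_index_py := by
  unfold Claim_changed_note_to_index_py; decide

theorem note_to_index_py_tight : Claim_exact_note_to_index_py := by
  intro note _ hpre hD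
  obtain ⟨hrest, _⟩ := hpre
  obtain ⟨hd, hcnt⟩ := hD
  simp only [List.span_eq_takeWhile_dropWhile] at hd hcnt
  cases hl : note.toList with
  | nil => exact absurd (by rw [hl]; rfl) hrest
  | cons c0 tail =>
    have htail : note.toList.drop 1 = tail := by simp [hl]
    rw [htail] at hrest hd hcnt
    have hA : note_to_index_py note = noteToIndexARec c0 tail := by
      unfold note_to_index_py; rw [hl]
    rw [hA, A_char, B_char note c0 tail hl]
    unfold tailValue
    cases hr : tail.dropWhile (fun c => c == '#' || c == '-') with
    | nil => exact absurd hr hrest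
    | cons c r =>
      simp only []
      have hdc : PySem.Chars.isdigit c = false := by
        rw [hr] at hd; simpa using hd
      simp only [hdc, Bool.false_eq_true, if_false]
      have hoff : tailOffset tail ≠ 0 := by
        unfold tailOffset
        intro h
        apply hcnt
        omega
      omega
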